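-- pv_equiv track=rewrite | github.com/callorico/adventofcode | 2021/24/day24.py | search
-- ===== SOURCE A (Python) =====
-- from typing import List, Dict, Tuple
--
-- def search(
--     reversed_input: List[Tuple[int, int]],
--     states: List[Dict[int, Dict[int, int]]]
-- ) -> List[str]:
--     if not states:
--         values = list(reversed([str(w) for z, w in reversed_input]))
--         return [''.join(values)]
--
--     result = []
--     state = states[0]
--     last_z_input, _ = reversed_input[-1]
--     for prev_input in state[last_z_input].items():
--         result.extend(search(reversed_input + [prev_input], states[1:]))
--
--     return result
-- ===== SOURCE B (Python) =====
-- def search(reversed_input, states):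
--     partials = [reversed_input]
--     for state in states:
--         partials = [p + [item]
--                     for p in partials
--                     for item in state[p[-1][0]].items()]
--     return [''.join(str(w) for _, w in reversed(p)) for p in partials]
-- ===== Notes on version B (the rewrite author's own statement) =====
-- stated objective: alternative
-- what changed: Replaced the recursive DFS (slicing states and extending via recursive calls) by an iterative breadth-first layer-by-layer expansion of a list of partial paths, rendering all outputs in one final pass.
import Mathlib
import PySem

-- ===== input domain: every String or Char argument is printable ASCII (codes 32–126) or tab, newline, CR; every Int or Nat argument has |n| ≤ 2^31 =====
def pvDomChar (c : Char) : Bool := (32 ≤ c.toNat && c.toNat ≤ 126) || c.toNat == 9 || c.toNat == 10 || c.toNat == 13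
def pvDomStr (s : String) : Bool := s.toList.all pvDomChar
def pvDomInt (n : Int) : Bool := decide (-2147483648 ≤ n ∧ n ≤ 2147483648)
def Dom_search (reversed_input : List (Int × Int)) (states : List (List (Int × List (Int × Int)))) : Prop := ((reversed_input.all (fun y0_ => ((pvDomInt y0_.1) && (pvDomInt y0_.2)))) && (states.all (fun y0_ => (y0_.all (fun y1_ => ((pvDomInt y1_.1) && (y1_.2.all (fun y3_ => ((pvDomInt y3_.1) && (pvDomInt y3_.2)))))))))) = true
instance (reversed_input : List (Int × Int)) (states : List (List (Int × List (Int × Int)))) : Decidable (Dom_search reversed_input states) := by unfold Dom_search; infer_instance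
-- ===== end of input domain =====

-- B replaces A's recursive DFS by an iterative layer-by-layer expansion of partial paths; same cost, different decomposition.

-- ===== PORT A =====
-- literal port of A's recursion; the branches where Python raises (IndexError on
-- reversed_input[-1], KeyError on state[last_z_input]) return [] and are excluded by Pre_search
def search (reversed_input : List (Int × Int)) (states : List (List (Int × List (Int × Int)))) : List String :=
  match states with
  | [] => [PySem.Str.join "" ((reversed_input.map (fun p => PySem.Int.toStr p.2)).reverse)]
  | state :: rest =>
    match PySem.List.pyGet? reversed_input (-1) with
    | none => []  -- IndexError, outside Pre_search
    | some lastp =>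
      match (PySem.Dict.ofList state).get? lastp.1 with
      | none => []  -- KeyError, outside Pre_search
      | some inner =>
        ((PySem.Dict.ofList inner).items).foldl
          (fun acc p => acc ++ search (reversed_input ++ [p]) rest) []

-- ===== PORT B =====
-- one layer of B's comprehension: extend one partial path p by every item of state[p[-1][0]]
def pvExpandOne (state : List (Int × List (Int × Int))) (p : List (Int × Int)) : List (List (Int × Int)) :=
  match PySem.List.pyGet? p (-1) with
  | none => []  -- IndexError, outside Pre_search
  | some lastp =>
    match (PySem.Dict.ofList state).get? lastp.1 with
    | none => []  -- KeyError, outside Pre_search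
    | some inner => ((PySem.Dict.ofList inner).items).map (fun it => p ++ [it])

def search_alt (reversed_input : List (Int × Int)) (states : List (List (Int × List (Int × Int)))) : List String :=
  (states.foldl (fun ps state => ps.flatMap (pvExpandOne state)) [reversed_input]).map
    (fun p => PySem.Str.join "" (p.reverse.map (fun q => PySem.Int.toStr q.2)))

-- ===== PRECONDITION & SPEC =====
-- reachable last-keys after consuming one layer
def pvNextKeys (state : List (Int × List (Int × Int))) (ks : List Int) : List Int :=
  PySem.List.dedup (ks.flatMap (fun k => (PySem.Dict.ofList ((PySem.Dict.ofList state).getD k [])).keys))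

-- every reachable key at each layer must be present in that layer's dict (else Python raises KeyError)
def pvKeysOK (ks : List Int) (states : List (List (Int × List (Int × Int)))) : Bool :=
  match states with
  | [] => true
  | state :: rest =>
    ks.all (fun k => (PySem.Dict.ofList state).contains k) && pvKeysOK (pvNextKeys state ks) rest

-- Pre_search holds exactly when Python A returns normally: with a non-empty states list,
-- reversed_input must be non-empty (else IndexError) and every key reached along any path
-- must be present in its layer's dict (else KeyError).
def Pre_search (reversed_input : List (Int × Int)) (states : List (List (Int × List (Int × Int)))) : Prop :=
  (match states with
   | [] => true
   | _ :: _ =>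
     match reversed_input.getLast? with
     | none => false
     | some lastp => pvKeysOK [lastp.1] states) = true
instance (reversed_input : List (Int × Int)) (states : List (List (Int × List (Int × Int)))) : Decidable (Pre_search reversed_input states) := by unfold Pre_search; infer_instance

def pvWitness_search : (List (Int × Int)) × (List (List (Int × List (Int × Int)))) :=
  ([(0, 5)], [[(0, [(1, 2), (3, 4)])], [(1, [(0, 9)]), (3, [(0, 8)])]])

def Spec_search (reversed_input : List (Int × Int)) (states : List (List (Int × List (Int × Int)))) (out : List String) : Prop := out = search_alt reversed_input states
instance (reversed_input : List (Int × Int)) (states : List (List (Int × List (Int × Int)))) (out : List String) : Decidable (Spec_search reversed_input states out) := by unfold Spec_search; infer_instance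

-- ===== CLAIM (what is proved, stated in full; the proofs are below) =====
def Claim_equal_search : Prop := ∀ (reversed_input : List (Int × Int)) (states : List (List (Int × List (Int × Int)))), Dom_search reversed_input states → Pre_search reversed_input states → Spec_search reversed_input states (search reversed_input states)

-- ===== LEMMAS AND PROOFS =====
def pvRender (p : List (Int × Int)) : String :=
  PySem.Str.join "" (p.reverse.map (fun q => PySem.Int.toStr q.2))

theorem pvExpand_flatMap (rest : List (List (Int × List (Int × Int))))
    (state : List (Int × List (Int × Int))) (p : List (Int × Int)) :
    (pvExpandOne state p).flatMap (fun q => search q rest) = search p (state :: rest) := by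
  cases h1 : PySem.List.pyGet? p (-1) with
  | none => simp [pvExpandOne, search, h1]
  | some lastp =>
    cases h2 : (PySem.Dict.ofList state).get? lastp.1 with
    | none => simp [pvExpandOne, search, h1, h2]
    | some inner =>
      rw [show search p (state :: rest)
            = ((PySem.Dict.ofList inner).items).foldl
                (fun acc q => acc ++ search (p ++ [q]) rest) [] from by simp [search, h1, h2]]
      rw [PySem.List.foldl_append_eq_flatMap]
      simp [pvExpandOne, h1, h2, List.flatMap_map]

theorem pvLayers_key (states : List (List (Int × List (Int × Int))))
    (ps : List (List (Int × Int))) :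
    (states.foldl (fun ps state => ps.flatMap (pvExpandOne state)) ps).map pvRender
      = ps.flatMap (fun p => search p states) := by
  induction states generalizing ps with
  | nil =>
    simp only [List.foldl_nil, search]
    induction ps with
    | nil => simp
    | cons p ps ih => simp [ih, pvRender, List.map_reverse]
  | cons state rest ih =>
    simp only [List.foldl_cons]
    rw [ih, List.flatMap_assoc]
    exact List.flatMap_congr (fun p _ => pvExpand_flatMap rest state p)

-- ===== VERDICT (by name: the statement is the Claim_ definition above) =====
theorem search_spec : Claim_equal_search := by
  intro reversed_input states _ _
  unfold Spec_search search_alt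
  have h := pvLayers_key states [reversed_input]
  simp only [List.flatMap_cons, List.flatMap_nil, List.append_nil] at h
  rw [show (fun p => PySem.Str.join "" (p.reverse.map (fun q => PySem.Int.toStr q.2))) = pvRender from rfl, h]
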